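-- pv_equiv track=rewrite | github.com/thorinf/score-based-diffusion-lm | pytorch/data.py | packed_mask
-- ===== SOURCE A (Python) =====
-- def packed_mask(lengths):
--     mask = []
--     for l in lengths:
--         row = []
--         for ll in lengths:
--             row.extend([1 if ll == l else 0] * ll)
--         mask.extend([row] * l)
--     return mask
-- ===== SOURCE B (Python) =====
-- def packed_mask(lengths):
--     vals = [l for l in lengths for _ in range(l)]
--     return [[1 if w == v else 0 for w in vals] for v in vals]
-- ===== Notes on version B (the rewrite author's own statement) =====
-- stated objective: simpler
-- what changed: B flattens the lengths into a per-position value array and builds the mask as a pairwise equality comprehension over positions, instead of A's per-segment row construction with replicated row references.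
import Mathlib
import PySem

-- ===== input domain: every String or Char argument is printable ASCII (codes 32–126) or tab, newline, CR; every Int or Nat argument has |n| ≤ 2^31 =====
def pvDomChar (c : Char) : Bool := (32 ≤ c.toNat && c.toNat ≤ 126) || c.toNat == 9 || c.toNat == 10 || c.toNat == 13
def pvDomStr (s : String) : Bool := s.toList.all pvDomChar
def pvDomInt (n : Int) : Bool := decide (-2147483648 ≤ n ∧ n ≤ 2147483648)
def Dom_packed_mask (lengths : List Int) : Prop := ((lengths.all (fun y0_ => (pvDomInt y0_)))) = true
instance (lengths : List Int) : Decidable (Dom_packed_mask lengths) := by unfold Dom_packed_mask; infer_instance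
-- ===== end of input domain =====

-- B rebuilds the mask as a pairwise equality table over the flattened per-position length values instead of A's per-segment replicated block rows (objective: simpler decomposition; same returned value).


-- ===== PORT A =====
def packed_mask (lengths : List Int) : List (List Int) :=
  lengths.foldl (fun mask l =>
    let row := lengths.foldl (fun row ll =>
      row ++ List.replicate ll.toNat (if ll == l then (1 : Int) else 0)) []
    mask ++ List.replicate l.toNat row) []

-- ===== PORT B =====
def packed_mask_alt (lengths : List Int) : List (List Int) :=
  let vals := lengths.flatMap (fun l => List.replicate l.toNat l)
  vals.map (fun v => vals.map (fun w => if w == v then (1 : Int) else 0))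

-- ===== PRECONDITION & SPEC =====
def Spec_packed_mask (lengths : List Int) (out : List (List Int)) : Prop := out = packed_mask_alt lengths
instance (lengths : List Int) (out : List (List Int)) : Decidable (Spec_packed_mask lengths out) := by unfold Spec_packed_mask; infer_instance

-- ===== CLAIM (what is proved, stated in full; the proofs are below) =====
def Claim_equal_packed_mask : Prop := ∀ (lengths : List Int), Dom_packed_mask lengths → Spec_packed_mask lengths (packed_mask lengths)

-- ===== LEMMAS AND PROOFS =====

-- ===== VERDICT (by name: the statement is the Claim_ definition above) =====
lemma flatMap_replicate_map {α β : Type} (lengths : List Int) (f : Int → α) (g : α → β) :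
    ((lengths.flatMap (fun l => List.replicate l.toNat (f l))).map g)
      = lengths.flatMap (fun l => List.replicate l.toNat (g (f l))) := by
  rw [List.map_flatMap]
  simp [List.map_replicate]

theorem packed_mask_spec : Claim_equal_packed_mask := by
  intro lengths _
  unfold Spec_packed_mask packed_mask packed_mask_alt
  simp only [PySem.List.foldl_append_eq_flatMap, List.nil_append]
  rw [show (lengths.flatMap (fun l => List.replicate l.toNat l)).map
        (fun v => (lengths.flatMap (fun l => List.replicate l.toNat l)).map
          (fun w => if w == v then (1 : Int) else 0))
      = lengths.flatMap (fun l => List.replicate l.toNat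
          ((lengths.flatMap (fun ll => List.replicate ll.toNat ll)).map
            (fun w => if w == l then (1 : Int) else 0)))
      from flatMap_replicate_map lengths id _]
  congr 1
  funext l
  congr 1
  exact (flatMap_replicate_map lengths id (fun w => if w == l then (1:Int) else 0)).symm
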